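-- pv_equiv track=rewrite | github.com/mmbeyrem/Aoc2021 | 13/main.py | count_dots
-- ===== SOURCE A (Python) =====
-- def count_dots(matrix):
--     count = 0
--     for l in matrix:
--         if all(map(lambda c: c == '-', l)):
--             break
--         for c in l:
--             if c == '-':
--                 break
--             count += 1 if c == '#' else 0
--     return count
-- ===== SOURCE B (Python) =====
-- def count_dots(matrix):
--     # Divide-and-conquer instead of A's single break-at-row loop: each half
--     # reports (hash count, whether it contains the stop row); the right half's
--     # contribution is discarded when the left half already stopped.
--     def solve(rows):
--         if len(rows) == 1:
--             row = rows[0]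
--             if set(row) <= {'-'}:
--                 return (0, True)
--             return (row.split('-', 1)[0].count('#'), False)
--         mid = len(rows) // 2
--         hashes, stopped = solve(rows[:mid])
--         if stopped:
--             return (hashes, True)
--         more, stopped = solve(rows[mid:])
--         return (hashes + more, stopped)
--     if not matrix:
--         return 0
--     return solve(matrix)[0]
-- ===== Notes on version B (the rewrite author's own statement) =====
-- stated objective: alternative
-- what changed: Replaces A's single break-at-first-all-dash loop with char-accumulator by a divide-and-conquer: each half returns (hash count before '-' per row via split, stop flag), and the right half's result is discarded when the left half stopped.
import Mathlib
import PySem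

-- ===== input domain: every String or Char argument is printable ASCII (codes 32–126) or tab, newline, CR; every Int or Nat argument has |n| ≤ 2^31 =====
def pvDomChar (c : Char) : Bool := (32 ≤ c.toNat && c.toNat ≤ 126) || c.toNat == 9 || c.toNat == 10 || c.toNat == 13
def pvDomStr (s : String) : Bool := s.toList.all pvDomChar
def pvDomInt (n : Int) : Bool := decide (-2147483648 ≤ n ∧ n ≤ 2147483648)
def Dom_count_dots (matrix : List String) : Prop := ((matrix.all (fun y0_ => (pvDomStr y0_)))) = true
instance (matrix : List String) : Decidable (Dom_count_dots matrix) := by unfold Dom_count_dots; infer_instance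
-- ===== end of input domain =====

-- B replaces A's break-at-row loop with a divide-and-conquer over the row list,
-- combining (hash count, stop flag) pairs of the two halves (objective: alternative).

-- ===== PORT A =====
-- inner 'for c in l' loop of A: break at '-', else count += 1 if c == '#' else 0
def pvInnerA : List Char → Int → Int
  | [], count => count
  | c :: cs, count =>
    if c == '-' then count
    else pvInnerA cs (count + if c == '#' then 1 else 0)

-- outer 'for l in matrix' loop of A carrying count; break at an all-dash row
def pvLoopA : List String → Int → Int
  | [], count => count
  | l :: rest, count =>
    if l.toList.all (fun c => c == '-') then count
    else pvLoopA rest (pvInnerA l.toList count)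

def count_dots (matrix : List String) : Int := pvLoopA matrix 0

-- ===== PORT B =====
-- B's recursive solve(rows): requires rows ≠ [] in Python (guaranteed by the caller);
-- the [] branch here is unreachable filler.
def pvSolve : List String → Int × Bool
  | [] => (0, false)
  | [row] =>
    if PySem.Set.issubset (PySem.Set.ofList row.toList) ['-'] then (0, true)
    else ((PySem.Str.count (((PySem.Str.splitMax? row "-" 1).getD []).headD "") "#" : Int), false)
  | a :: b :: t =>
    let mid := (a :: b :: t).length / 2
    let left := pvSolve ((a :: b :: t).take mid)
    if left.2 then (left.1, true)
    else
      let right := pvSolve ((a :: b :: t).drop mid)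
      (left.1 + right.1, right.2)
termination_by rows => rows.length
decreasing_by
  · simp; omega
  · simp; omega

def count_dots_alt (matrix : List String) : Int :=
  if matrix = [] then 0 else (pvSolve matrix).1

-- ===== PRECONDITION & SPEC =====
def Spec_count_dots (matrix : List String) (out : Int) : Prop := out = count_dots_alt matrix
instance (matrix : List String) (out : Int) : Decidable (Spec_count_dots matrix out) := by unfold Spec_count_dots; infer_instance

-- ===== CLAIM (what is proved, stated in full; the proofs are below) =====
def Claim_equal_count_dots : Prop := ∀ (matrix : List String), Dom_count_dots matrix → Spec_count_dots matrix (count_dots matrix)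

-- ===== LEMMAS AND PROOFS =====

-- A's inner loop is linear in its accumulator
theorem pvInnerA_acc (l : List Char) (acc : Int) :
    pvInnerA l acc = acc + pvInnerA l 0 := by
  induction l generalizing acc with
  | nil => simp [pvInnerA]
  | cons a t ih =>
    by_cases h : a = '-'
    · subst h; simp [pvInnerA]
    · have hbeq : (a == '-') = false := by simp [h]
      simp only [pvInnerA, hbeq, Bool.false_eq_true, if_false]
      rw [ih, ih (0 + _)]
      ring

-- A's outer loop is linear in its accumulator
theorem pvLoopA_acc (m : List String) (acc : Int) :
    pvLoopA m acc = acc + pvLoopA m 0 := by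
  induction m generalizing acc with
  | nil => simp [pvLoopA]
  | cons l rest ih =>
    by_cases h : (l.toList.all (fun c => c == '-')) = true
    · simp [pvLoopA, h]
    · simp only [pvLoopA, h, Bool.false_eq_true, if_false]
      rw [ih, ih (pvInnerA l.toList 0), pvInnerA_acc]
      ring

-- A's loop over an append: stops inside the left part iff it has an all-dash row
theorem pvLoopA_append (l r : List String) (acc : Int) :
    pvLoopA (l ++ r) acc =
      if ∃ s ∈ l, (s.toList.all (fun c => c == '-')) = true
      then pvLoopA l acc else pvLoopA r (pvLoopA l acc) := by
  induction l generalizing acc with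
  | nil => simp [pvLoopA]
  | cons s t ih =>
    by_cases h : (s.toList.all (fun c => c == '-')) = true
    · have hex' : ∃ x ∈ s :: t, (x.toList.all (fun c => c == '-')) = true := ⟨s, by simp, h⟩
      simp only [List.cons_append, pvLoopA, h, if_true, if_pos hex']
    · have hex : (∃ x ∈ s :: t, (x.toList.all (fun c => c == '-')) = true)
          ↔ (∃ x ∈ t, (x.toList.all (fun c => c == '-')) = true) := by
        constructor
        · rintro ⟨x, hx, hp⟩
          rcases List.mem_cons.mp hx with rfl | hx'
          · exact absurd hp h
          · exact ⟨x, hx', hp⟩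
        · rintro ⟨x, hx, hp⟩
          exact ⟨x, List.mem_cons_of_mem _ hx, hp⟩
      simp only [List.cons_append, pvLoopA, h, Bool.false_eq_true, if_false, ih]
      by_cases hx : ∃ x ∈ t, (x.toList.all (fun c => c == '-')) = true
      · rw [if_pos hx, if_pos (hex.mpr hx)]
      · rw [if_neg hx, if_neg (fun hh => hx (hex.mp hh))]

-- splitOnMax .go at maxsplit 0 wraps up immediately
theorem pvGo_zero (fuel : Nat) (l cur : List Char) (acc : List (List Char)) :
    PySem.Chars.splitOnMax.go ['-'] fuel 0 l cur acc = ((cur.reverse ++ l) :: acc).reverse := by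
  cases fuel with
  | zero => rfl
  | succ n => cases l <;> simp [PySem.Chars.splitOnMax.go]

-- splitOnMax .go at maxsplit 1 from an empty accumulator: head is the prefix before '-'
theorem pvGo_one (l : List Char) (fuel : Nat) (cur : List Char) (h : l.length ≤ fuel) :
    PySem.Chars.splitOnMax.go ['-'] fuel 1 l cur [] =
      if '-' ∈ l
      then [cur.reverse ++ l.takeWhile (fun a => a != '-'), l.drop (l.idxOf '-' + 1)]
      else [cur.reverse ++ l] := by
  induction l generalizing fuel cur with
  | nil =>
    cases fuel <;> simp [PySem.Chars.splitOnMax.go]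
  | cons a t ih =>
    cases fuel with
    | zero => simp at h
    | succ n =>
      simp only [List.length_cons, Nat.succ_le_succ_iff] at h
      by_cases ha : a = '-'
      · subst ha
        have hp : ['-'].isPrefixOf ('-' :: t) = true := by simp [List.isPrefixOf]
        simp only [PySem.Chars.splitOnMax.go, hp, if_true]
        rw [pvGo_zero]
        simp [List.idxOf_cons_self]
      · have hp : ['-'].isPrefixOf (a :: t) = false := by
          simp [List.isPrefixOf]; exact fun hh => (ha hh.symm).elim
        have hbeq : (a == '-') = false := by simp [ha]
        simp only [PySem.Chars.splitOnMax.go, hp, Bool.false_eq_true, if_false]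
        rw [ih n (a :: cur) h]
        by_cases hm : '-' ∈ t
        · simp [hm, ha]
        · simp [hm, Ne.symm ha]

-- count.go with a single-character needle counts occurrences of that character
theorem pvCountGoSingle (c : Char) (l : List Char) (acc fuel : Nat) (h : l.length ≤ fuel) :
    PySem.Chars.count.go [c] fuel l acc = acc + l.count c := by
  induction l generalizing acc fuel with
  | nil =>
    cases fuel <;> simp [PySem.Chars.count.go]
  | cons a t ih =>
    cases fuel with
    | zero => simp at h
    | succ n =>
      simp only [List.length_cons, Nat.succ_le_succ_iff] at h
      by_cases hac : a = c
      · subst hac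
        have hp : [a].isPrefixOf (a :: t) = true := by simp [List.isPrefixOf]
        simp only [PySem.Chars.count.go, hp, if_true, List.length_singleton, List.drop_one,
          List.tail_cons]
        rw [ih (acc + 1) n h]
        simp
        omega
      · have hp : [c].isPrefixOf (a :: t) = false := by
          simp [List.isPrefixOf]; exact fun hh => (hac hh.symm).elim
        simp only [PySem.Chars.count.go, hp, Bool.false_eq_true, if_false]
        rw [ih acc n h]
        simp [hac]

theorem pvCountSingle (c : Char) (l : List Char) :
    PySem.Chars.count l [c] = l.count c := by
  simp [PySem.Chars.count]
  rw [pvCountGoSingle c l 0 l.length (le_refl _)]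
  simp

-- A's inner loop counts the '#' before the first '-'
theorem pvInnerA_eq (l : List Char) :
    pvInnerA l 0 = ((l.takeWhile (fun a => a != '-')).count '#' : Int) := by
  induction l with
  | nil => simp [pvInnerA]
  | cons a t ih =>
    by_cases h : a = '-'
    · subst h; simp [pvInnerA]
    · have hbeq : (a == '-') = false := by simp [h]
      simp only [pvInnerA, hbeq, Bool.false_eq_true, if_false]
      rw [pvInnerA_acc, ih, List.takeWhile_cons]
      simp
      by_cases h2 : a = '#'
      · simp [h2]; omega
      · simp [h2, h]

-- B's per-row split-head value equals A's inner loop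
theorem pvRowB_eq (s : String) :
    (PySem.Str.count (((PySem.Str.splitMax? s "-" 1).getD []).headD "") "#" : Int)
      = pvInnerA s.toList 0 := by
  have hsep : ("-" : String).toList = ['-'] := rfl
  have hgo := pvGo_one s.toList (s.toList.length + 1) [] (by omega)
  rw [String.length_toList] at hgo
  have hc : ("#" : String).toList = ['#'] := rfl
  rw [pvInnerA_eq]
  by_cases hm : '-' ∈ s.toList
  · rw [if_pos hm] at hgo
    simp [PySem.Str.splitMax?, PySem.Chars.splitMax?, hsep, PySem.Chars.splitOnMax, hgo,
      PySem.Str.count, hc, pvCountSingle]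
  · rw [if_neg hm] at hgo
    have htw : s.toList.takeWhile (fun a => a != '-') = s.toList :=
      List.takeWhile_eq_self_iff.mpr (fun x hx => by
        simp
        intro hxe; exact hm (hxe ▸ hx))
    simp [PySem.Str.splitMax?, PySem.Chars.splitMax?, hsep, PySem.Chars.splitOnMax, hgo,
      PySem.Str.count, hc, pvCountSingle, htw]

-- Python's subset test set(row) <= {'-'} is A's all-dash test
theorem pvSubset_eq (row : String) :
    PySem.Set.issubset (PySem.Set.ofList row.toList) ['-'] = row.toList.all (fun c => c == '-') := by
  rw [Bool.eq_iff_iff, PySem.Set.issubset_iff, List.all_eq_true]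
  simp [PySem.Set.mem_ofList]

-- unfolding equation for pvSolve on a two-or-more-element list
theorem pvSolve_cons2 (a b : String) (t : List String) :
    pvSolve (a :: b :: t) =
      (if (pvSolve ((a :: b :: t).take ((a :: b :: t).length / 2))).2 = true
       then ((pvSolve ((a :: b :: t).take ((a :: b :: t).length / 2))).1, true)
       else ((pvSolve ((a :: b :: t).take ((a :: b :: t).length / 2))).1
              + (pvSolve ((a :: b :: t).drop ((a :: b :: t).length / 2))).1,
             (pvSolve ((a :: b :: t).drop ((a :: b :: t).length / 2))).2)) := by
  rw [pvSolve]

-- B's divide-and-conquer computes A's loop value plus the stop flag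
theorem pvSolve_spec (rows : List String) :
    rows ≠ [] → pvSolve rows = (pvLoopA rows 0,
      decide (∃ s ∈ rows, (s.toList.all (fun c => c == '-')) = true)) := by
  induction rows using pvSolve.induct with
  | case1 => intro h; exact absurd rfl h
  | case2 row hsub =>
    intro _
    have hd : (row.toList.all (fun c => c == '-')) = true := by
      rw [← pvSubset_eq]; exact hsub
    rw [pvSolve, if_pos hsub]
    have h1 : pvLoopA [row] 0 = 0 := by simp [pvLoopA, hd]
    have hdd : decide (∃ s ∈ [row], (s.toList.all (fun c => c == '-')) = true) = true := by
      simp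
      exact fun x hx => by simpa using List.all_eq_true.mp hd x hx
    rw [h1, hdd]
  | case3 row hsub =>
    intro _
    have hd : ¬ (row.toList.all (fun c => c == '-')) = true := by
      rw [← pvSubset_eq]; exact hsub
    rw [pvSolve, if_neg hsub]
    have h1 : pvLoopA [row] 0 = pvInnerA row.toList 0 := by simp [pvLoopA, hd]
    have hdd : decide (∃ s ∈ [row], (s.toList.all (fun c => c == '-')) = true) = false := by
      simp only [decide_eq_false_iff_not]
      simpa using hd
    rw [h1, hdd, ← pvRowB_eq]
  | case4 a b t mid left hflag ih =>
    intro _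
    have hmid : mid = (a :: b :: t).length / 2 := rfl
    have hleft : left = pvSolve (List.take mid (a :: b :: t)) := rfl
    clear_value mid left
    subst hleft
    subst hmid
    have hmid1 : 1 ≤ (a :: b :: t).length / 2 := by simp; omega
    have hne : List.take ((a :: b :: t).length / 2) (a :: b :: t) ≠ [] := by
      intro hcon
      rcases List.take_eq_nil_iff.mp hcon with h0 | h0
      · omega
      · exact absurd h0 (by simp)
    have hT := ih hne
    rw [hT] at hflag
    have hex : ∃ s ∈ List.take ((a :: b :: t).length / 2) (a :: b :: t),
        (s.toList.all (fun c => c == '-')) = true := by simpa using hflag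
    have hexR : ∃ s ∈ a :: b :: t, (s.toList.all (fun c => c == '-')) = true := by
      obtain ⟨s, hs, hp⟩ := hex
      exact ⟨s, List.mem_of_mem_take hs, hp⟩
    have happ := pvLoopA_append (List.take ((a :: b :: t).length / 2) (a :: b :: t))
      (List.drop ((a :: b :: t).length / 2) (a :: b :: t)) 0
    rw [List.take_append_drop] at happ
    rw [pvSolve_cons2, hT, happ, if_pos hex]
    split
    · simp only [Prod.mk.injEq]
      refine ⟨by trivial, ?_⟩
      symm
      simpa using hexR
    · next hcond =>
      simp only [decide_eq_true_eq] at hcond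
      exact absurd hex hcond
  | case5 a b t mid left hflag ihl ihr =>
    intro _
    have hmid : mid = (a :: b :: t).length / 2 := rfl
    have hleft : left = pvSolve (List.take mid (a :: b :: t)) := rfl
    clear_value mid left
    subst hleft
    subst hmid
    have hmid1 : 1 ≤ (a :: b :: t).length / 2 := by simp; omega
    have hmid2 : (a :: b :: t).length / 2 < (a :: b :: t).length := by simp; omega
    have hne : List.take ((a :: b :: t).length / 2) (a :: b :: t) ≠ [] := by
      intro hcon
      rcases List.take_eq_nil_iff.mp hcon with h0 | h0
      · omega
      · exact absurd h0 (by simp)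
    have hne' : List.drop ((a :: b :: t).length / 2) (a :: b :: t) ≠ [] := by
      intro hcon
      have := List.drop_eq_nil_iff.mp hcon
      omega
    have hT := ihl hne
    have hD := ihr hne'
    rw [hT] at hflag
    have hnex : ¬ ∃ s ∈ List.take ((a :: b :: t).length / 2) (a :: b :: t),
        (s.toList.all (fun c => c == '-')) = true := by simpa using hflag
    have happ := pvLoopA_append (List.take ((a :: b :: t).length / 2) (a :: b :: t))
      (List.drop ((a :: b :: t).length / 2) (a :: b :: t)) 0
    rw [List.take_append_drop] at happ
    have hexiff : (∃ s ∈ a :: b :: t, (s.toList.all (fun c => c == '-')) = true)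
        ↔ (∃ s ∈ List.drop ((a :: b :: t).length / 2) (a :: b :: t),
            (s.toList.all (fun c => c == '-')) = true) := by
      constructor
      · rintro ⟨s, hs, hp⟩
        rw [← List.take_append_drop ((a :: b :: t).length / 2) (a :: b :: t),
          List.mem_append] at hs
        rcases hs with hs | hs
        · exact absurd ⟨s, hs, hp⟩ hnex
        · exact ⟨s, hs, hp⟩
      · rintro ⟨s, hs, hp⟩
        exact ⟨s, List.mem_of_mem_drop hs, hp⟩
    rw [pvSolve_cons2, hT, hD, happ, if_neg hnex,
      pvLoopA_acc (List.drop ((a :: b :: t).length / 2) (a :: b :: t))]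
    split
    · next hcond =>
      simp only [decide_eq_true_eq] at hcond
      exact absurd hcond hnex
    · simp only [Prod.mk.injEq]
      refine ⟨?_, decide_eq_decide.mpr hexiff.symm⟩
      rw [pvLoopA_acc (List.drop ((a :: b :: t).length / 2) (a :: b :: t))
        (pvLoopA (List.take ((a :: b :: t).length / 2) (a :: b :: t)) 0)]
      ring

-- ===== VERDICT (by name: the statement is the Claim_ definition above) =====
theorem count_dots_spec : Claim_equal_count_dots := by
  intro matrix _
  unfold Spec_count_dots count_dots count_dots_alt
  by_cases h : matrix = []
  · subst h; rfl
  · rw [if_neg h, pvSolve_spec matrix h]
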